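-- pv_equiv track=rewrite | github.com/jojonas/pykindletools | mobitools/util.py | variable_width_int_backwards
-- ===== SOURCE A (Python) =====
-- def variable_width_int_backwards(value):
-- 	bytes = []
-- 	if value == 0:
-- 		bytes.append(0b10000000)
-- 	else:
-- 		while value != 0:
-- 			bytes.append(value & 0b01111111)
-- 			value = value >> 7
-- 		bytes[-1] |= 0b10000000
--
-- 	return "".join(map(chr, reversed(bytes)))
-- ===== SOURCE B (Python) =====
-- def variable_width_int_backwards(value):
-- 	# count 7-bit groups first (0 still needs one byte), then emit big-endian directly,
-- 	# setting the continuation bit 0x80 on the most-significant (first) group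
-- 	n = max((value.bit_length() + 6) // 7, 1)
-- 	return "".join(
-- 		chr(((value >> (7 * i)) & 0x7f) | (0x80 if i == n - 1 else 0))
-- 		for i in range(n - 1, -1, -1)
-- 	)
-- ===== Notes on version B (the rewrite author's own statement) =====
-- stated objective: alternative
-- what changed: Instead of collecting seven-bit groups little-endian in a loop, then reversing the list and marking the last-collected byte, B computes the group count up front from bit_length() and emits the bytes big-endian in a single forward pass with no list, no reversal and no mutation; Pre_ excludes negative values, on which A's while loop never terminates (the right shift keeps the value negative).
import Mathlib
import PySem

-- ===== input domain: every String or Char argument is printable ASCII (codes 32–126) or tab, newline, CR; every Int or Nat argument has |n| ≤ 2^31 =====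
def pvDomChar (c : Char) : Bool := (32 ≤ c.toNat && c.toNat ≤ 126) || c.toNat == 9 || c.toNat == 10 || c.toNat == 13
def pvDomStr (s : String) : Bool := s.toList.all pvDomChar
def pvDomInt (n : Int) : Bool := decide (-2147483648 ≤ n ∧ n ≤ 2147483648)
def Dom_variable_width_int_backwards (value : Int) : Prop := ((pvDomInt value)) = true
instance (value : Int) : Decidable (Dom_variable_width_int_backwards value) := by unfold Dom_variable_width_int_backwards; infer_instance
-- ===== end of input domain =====

-- B replaces A's collect-little-endian-then-reverse-and-mark strategy by computing the
-- byte count from bit_length() first and emitting the bytes big-endian directly (alternative decomposition).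


-- ===== PORT A =====
-- the while loop: Python's guard is 'value != 0'; on the Pre_ domain 0 ≤ value this is
-- exactly 'stop when value ≤ 0', which is what makes the loop terminate.
def vwCollect (value : Int) (bytes : List Int) : List Int :=
  if value ≤ 0 then bytes
  else vwCollect (value >>> (7 : Int)) (bytes ++ [Int.land value 127])
termination_by value.toNat
decreasing_by
  rename_i h
  obtain ⟨m, rfl⟩ : ∃ m : Nat, value = (m : Int) := ⟨value.toNat, by omega⟩
  have h1 : (m : Int) >>> (7 : Int) = ((m >>> 7 : Nat) : Int) := by
    exact_mod_cast Int.shiftRight_natCast m 7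
  have h2 := Nat.shiftRight_eq_div_pow m 7
  have hm : 0 < m := by exact_mod_cast lt_of_not_ge h
  rw [h1]
  simp only [Int.toNat_natCast]
  omega

def variable_width_int_backwards (value : Int) : String :=
  let bytes : List Int :=
    if value = 0 then [128]
    else
      let bs := vwCollect value []
      -- bytes[-1] |= 0b10000000
      bs.dropLast ++ [Int.lor bs.getLast! 128]
  String.mk (bytes.reverse.map (fun b => Char.ofNat b.toNat))

-- ===== PORT B =====
def variable_width_int_backwards_alt (value : Int) : String :=
  let n : Int := max (PySem.Int.floordiv ((PySem.Int.bitLength value : Int) + 6) 7) 1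
  String.mk ((PySem.List.pyRange (n - 1) (-1) (-1)).map (fun i =>
    Char.ofNat ((Int.lor (Int.land (value >>> (7 * i)) 127) (if i = n - 1 then 128 else 0)).toNat)))

-- ===== PRECONDITION & SPEC =====
-- Pre_ excludes exactly the negative values: there A's 'while value != 0' loop never
-- terminates (the right shift keeps the value negative), so A returns nothing to match.
def Pre_variable_width_int_backwards (value : Int) : Prop := 0 ≤ value
instance (value : Int) : Decidable (Pre_variable_width_int_backwards value) := by
  unfold Pre_variable_width_int_backwards; infer_instance
def pvWitness_variable_width_int_backwards : Int := (300)

def Spec_variable_width_int_backwards (value : Int) (out : String) : Prop :=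
  out = variable_width_int_backwards_alt value
instance (value : Int) (out : String) : Decidable (Spec_variable_width_int_backwards value out) := by
  unfold Spec_variable_width_int_backwards; infer_instance

-- ===== CLAIM (what is proved, stated in full; the proofs are below) =====
def Claim_equal_variable_width_int_backwards : Prop :=
  ∀ (value : Int), Dom_variable_width_int_backwards value →
    Pre_variable_width_int_backwards value →
    Spec_variable_width_int_backwards value (variable_width_int_backwards value)

-- ===== LEMMAS AND PROOFS =====

-- the 7-bit group of m at index i, and the number of groups of a positive m
def vwGroup (m i : Nat) : Nat := (m >>> (7 * i)) &&& 127
def vwCnt (m : Nat) : Nat := (PySem.Int.bitLength (m : Int) + 6) / 7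

lemma vw_cast_shift (m k : Nat) : (m : Int) >>> ((k : Nat) : Int) = ((m >>> k : Nat) : Int) := by
  exact_mod_cast Int.shiftRight_natCast m k

lemma vw_cast_land (m k : Nat) : Int.land (m : Int) (k : Int) = ((m &&& k : Nat) : Int) := rfl

lemma vw_cast_lor (m k : Nat) : Int.lor (m : Int) (k : Int) = ((m ||| k : Nat) : Int) := rfl

lemma vw_bl_pos {m : Nat} (hm : 0 < m) : 1 ≤ PySem.Int.bitLength (m : Int) := by
  by_contra h
  have h0 : PySem.Int.bitLength (m : Int) = 0 := by omega
  have := PySem.Int.lt_two_pow_bitLength (m : Int)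
  rw [h0] at this
  simp [Int.natAbs_natCast] at this
  omega

lemma vw_bl_lower {m : Nat} (hm : 0 < m) :
    2 ^ (PySem.Int.bitLength (m : Int) - 1) ≤ m := by
  have := PySem.Int.two_pow_bitLength_le (m : Int) (by exact_mod_cast hm.ne')
  simpa using this

lemma vw_bl_upper (m : Nat) : m < 2 ^ PySem.Int.bitLength (m : Int) := by
  have := PySem.Int.lt_two_pow_bitLength (m : Int)
  simpa using this

-- uniqueness of the bit length from its bracketing
lemma vw_bl_unique {x a b : Nat} (ha1 : 1 ≤ a) (hb1 : 1 ≤ b)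
    (ha : 2 ^ (a - 1) ≤ x) (ha' : x < 2 ^ a) (hb : 2 ^ (b - 1) ≤ x) (hb' : x < 2 ^ b) :
    a = b := by
  rcases Nat.lt_trichotomy a b with h | h | h
  · have : (2 : Nat) ^ a ≤ 2 ^ (b - 1) := Nat.pow_le_pow_right (by norm_num) (by omega)
    omega
  · exact h
  · have : (2 : Nat) ^ b ≤ 2 ^ (a - 1) := Nat.pow_le_pow_right (by norm_num) (by omega)
    omega

lemma vw_bl_shift {m : Nat} (hm : 128 ≤ m) :
    PySem.Int.bitLength (m : Int) = PySem.Int.bitLength ((m >>> 7 : Nat) : Int) + 7 := by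
  have hd : m >>> 7 = m / 128 := by
    have := Nat.shiftRight_eq_div_pow m 7; norm_num at this; omega
  rw [hd]
  have hpos : 0 < m / 128 := Nat.div_pos hm (by norm_num)
  set b := PySem.Int.bitLength (m : Int) with hb
  set b' := PySem.Int.bitLength ((m / 128 : Nat) : Int) with hb'
  have h1 : 1 ≤ b := vw_bl_pos (by omega)
  have h1' : 1 ≤ b' := vw_bl_pos hpos
  have hlow : 2 ^ (b' - 1) ≤ m / 128 := vw_bl_lower hpos
  have hup : m / 128 < 2 ^ b' := vw_bl_upper (m / 128)
  have hlow2 : 2 ^ (b' + 7 - 1) ≤ m := by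
    have hmul : 2 ^ (b' - 1) * 128 ≤ m :=
      calc 2 ^ (b' - 1) * 128 ≤ m / 128 * 128 := Nat.mul_le_mul_right _ hlow
        _ ≤ m := Nat.div_mul_le_self m 128
    have he : 2 ^ (b' + 7 - 1) = 2 ^ (b' - 1) * 128 := by
      rw [show b' + 7 - 1 = (b' - 1) + 7 by omega, pow_add]; norm_num
    omega
  have hup2 : m < 2 ^ (b' + 7) := by
    have h3 : m < (m / 128 + 1) * 128 := by omega
    have h2 : (m / 128 + 1) * 128 ≤ 2 ^ b' * 128 := Nat.mul_le_mul_right _ (by omega)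
    have he : 2 ^ (b' + 7) = 2 ^ b' * 128 := by rw [pow_add]; norm_num
    omega
  have := vw_bl_unique h1 (by omega) (vw_bl_lower (show 0 < m by omega)) (vw_bl_upper m) hlow2 hup2
  omega

lemma vw_cnt_small {m : Nat} (hm : 0 < m) (hs : m < 128) : vwCnt m = 1 := by
  unfold vwCnt
  have h1 : 1 ≤ PySem.Int.bitLength (m : Int) := vw_bl_pos hm
  have h7 : PySem.Int.bitLength (m : Int) ≤ 7 := by
    by_contra h
    have h8 : (2 : Nat) ^ 7 ≤ 2 ^ (PySem.Int.bitLength (m : Int) - 1) :=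
      Nat.pow_le_pow_right (by norm_num) (by omega)
    have := vw_bl_lower hm
    norm_num at h8
    omega
  omega

lemma vw_cnt_one_le {m : Nat} (hm : 0 < m) : 1 ≤ vwCnt m := by
  unfold vwCnt
  have := vw_bl_pos hm
  omega

lemma vw_cnt_step {m : Nat} (hm : 128 ≤ m) : vwCnt m = vwCnt (m >>> 7) + 1 := by
  unfold vwCnt
  rw [vw_bl_shift hm]
  omega

lemma vw_group_shift (m i : Nat) : vwGroup (m >>> 7) i = vwGroup m (i + 1) := by
  unfold vwGroup
  rw [← Nat.shiftRight_add]
  ring_nf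

lemma vw_group_zero (m : Nat) : vwGroup m 0 = m &&& 127 := by
  unfold vwGroup
  norm_num

-- the collecting loop produces the little-endian list of all 7-bit groups
lemma vw_collect_eq (m : Nat) (hm : 0 < m) :
    ∀ bytes : List Int,
      vwCollect (m : Int) bytes =
        bytes ++ (List.range (vwCnt m)).map (fun i => ((vwGroup m i : Nat) : Int)) := by
  induction m using Nat.strong_induction_on with
  | _ m ih =>
    intro bytes
    rw [vwCollect]
    have hng : ¬ ((m : Int) ≤ 0) := by omega
    rw [if_neg hng]
    have hs : (m : Int) >>> (7 : Int) = ((m >>> 7 : Nat) : Int) := by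
      exact_mod_cast Int.shiftRight_natCast m 7
    have hl : Int.land (m : Int) 127 = ((m &&& 127 : Nat) : Int) := vw_cast_land m 127
    have hdiv : m >>> 7 = m / 128 := by
      have := Nat.shiftRight_eq_div_pow m 7; norm_num at this; omega
    by_cases hsmall : m < 128
    · have hz : m >>> 7 = 0 := by omega
      rw [hs, hl, hz]
      rw [vwCollect]
      rw [if_pos (by norm_num)]
      rw [vw_cnt_small hm hsmall]
      simp [List.range_succ, vw_group_zero]
    · have hpos : 0 < m >>> 7 := by omega
      have hlt : m >>> 7 < m := by omega
      rw [hs, hl, ih (m >>> 7) hlt hpos (bytes ++ [((m &&& 127 : Nat) : Int)])]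
      rw [vw_cnt_step (show 128 ≤ m by omega)]
      rw [List.append_assoc]
      congr 1
      rw [List.range_succ_eq_map, List.map_cons, List.map_map, List.singleton_append]
      congr 1
      apply List.map_congr_left
      intro i _
      simp [vw_group_shift]

-- reversing a map over a range flips the index
lemma vw_rev_range_map {α : Type} (f : Nat → α) (n : Nat) :
    ((List.range n).map f).reverse = (List.range n).map (fun i => f (n - 1 - i)) := by
  apply List.ext_getElem (by simp)
  intro i h1 h2
  simp only [List.length_map, List.length_range] at h1 h2
  rw [List.getElem_reverse]
  simp only [List.getElem_map, List.getElem_range, List.length_map, List.length_range]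

lemma vw_getLast!_concat (l : List Int) (x : Int) : (l ++ [x]).getLast! = x := by
  induction l with
  | nil => rfl
  | cons a l ih =>
    cases l with
    | nil => rfl
    | cons b l => simpa using ih

-- the marked byte list, as a single map over the index range
lemma vw_marked_eq (m k : Nat) :
    (List.range k).map (fun i => ((vwGroup m i : Nat) : Int)) ++
        [Int.lor ((vwGroup m k : Nat) : Int) 128] =
      (List.range (k + 1)).map
        (fun j => if j = k then ((vwGroup m j ||| 128 : Nat) : Int) else ((vwGroup m j : Nat) : Int)) := by
  rw [List.range_succ, List.map_append]
  congr 1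
  · apply (List.map_congr_left _).symm
    intro j hj
    rw [List.mem_range] at hj
    rw [if_neg (by omega)]
  · simp only [List.map_cons, List.map_nil, if_true]
    rw [show (128 : Int) = ((128 : Nat) : Int) by norm_num, vw_cast_lor]

-- A's result, as a map over the reversed index range
lemma vw_A_eq (m : Nat) (hm : 0 < m) :
    variable_width_int_backwards (m : Int) =
      String.mk ((List.range (vwCnt m)).map
        (fun i => Char.ofNat (vwGroup m (vwCnt m - 1 - i) |||
          (if i = 0 then 128 else 0)))) := by
  obtain ⟨k, hk⟩ : ∃ k, vwCnt m = k + 1 := ⟨vwCnt m - 1, by have := vw_cnt_one_le hm; omega⟩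
  have hne : ¬ ((m : Int) = 0) := by omega
  have hbytes : vwCollect (m : Int) [] =
      (List.range (k + 1)).map (fun i => ((vwGroup m i : Nat) : Int)) := by
    rw [vw_collect_eq m hm [], List.nil_append, hk]
  have hmark : ((List.range (k + 1)).map (fun i => ((vwGroup m i : Nat) : Int))).dropLast ++
      [Int.lor ((List.range (k + 1)).map (fun i => ((vwGroup m i : Nat) : Int))).getLast! 128] =
      (List.range (k + 1)).map
        (fun j => if j = k then ((vwGroup m j ||| 128 : Nat) : Int) else ((vwGroup m j : Nat) : Int)) := by
    rw [List.range_succ, List.map_append, List.map_cons, List.map_nil]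
    rw [List.dropLast_concat, vw_getLast!_concat]
    rw [← List.range_succ]
    exact vw_marked_eq m k
  unfold variable_width_int_backwards
  simp only [if_neg hne]
  rw [hbytes, hmark, hk]
  congr 1
  rw [List.map_reverse, List.map_map, vw_rev_range_map]
  apply List.map_congr_left
  intro i hi
  rw [List.mem_range] at hi
  simp only [Function.comp_def]
  have harith : k + 1 - 1 - i = k - i := by omega
  rw [harith]
  by_cases hi0 : i = 0
  · subst hi0
    rw [Nat.sub_zero, if_pos rfl, if_pos rfl]
    simp only [Int.toNat_natCast]
  · have hne2 : ¬ (k - i = k) := by omega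
    rw [if_neg hne2, if_neg hi0]
    simp

-- B's result, as the same map
lemma vw_B_eq (m : Nat) (hm : 0 < m) :
    variable_width_int_backwards_alt (m : Int) =
      String.mk ((List.range (vwCnt m)).map
        (fun i => Char.ofNat (vwGroup m (vwCnt m - 1 - i) |||
          (if i = 0 then 128 else 0)))) := by
  obtain ⟨k, hk⟩ : ∃ k, vwCnt m = k + 1 := ⟨vwCnt m - 1, by have := vw_cnt_one_le hm; omega⟩
  unfold variable_width_int_backwards_alt
  have hfd : PySem.Int.floordiv ((PySem.Int.bitLength ((m : Nat) : Int) : Int) + 6) 7 =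
      ((vwCnt m : Nat) : Int) := by
    unfold vwCnt
    rw [show ((PySem.Int.bitLength ((m : Nat) : Int) : Int) + 6) =
        (((PySem.Int.bitLength ((m : Nat) : Int) + 6 : Nat) : Nat) : Int) by push_cast; ring]
    rw [show (7 : Int) = ((7 : Nat) : Int) by norm_num]
    rw [PySem.Int.floordiv_natCast]
  have hmax' : max (((k + 1 : Nat) : Nat) : Int) 1 = (((k + 1 : Nat) : Nat) : Int) := by
    omega
  simp only [hfd, hk, hmax']
  have hrange : PySem.List.pyRange (((k + 1 : Nat) : Int) - 1) (-1) (-1) =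
      (List.range (k + 1)).map (fun j => ((k : Nat) : Int) - (j : Nat)) := by
    rw [PySem.List.pyRange_neg_one]
    have h1 : ((((k + 1 : Nat) : Int) - 1) - (-1)).toNat = k + 1 := by omega
    rw [h1]
    apply List.map_congr_left
    intro j hj
    push_cast
    ring
  rw [hrange, List.map_map]
  congr 1
  apply List.map_congr_left
  intro j hj
  rw [List.mem_range] at hj
  simp only [Function.comp_def]
  have hj' : ((k : Nat) : Int) - (j : Nat) = ((k - j : Nat) : Int) := by
    have : j ≤ k := by omega
    omega
  rw [hj']
  have hsh : ((m : Nat) : Int) >>> (7 * ((k - j : Nat) : Int)) =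
      ((m >>> (7 * (k - j)) : Nat) : Int) := by
    rw [show (7 : Int) * ((k - j : Nat) : Int) = ((7 * (k - j) : Nat) : Int) by push_cast; ring]
    exact vw_cast_shift m (7 * (k - j))
  rw [hsh]
  rw [show (127 : Int) = ((127 : Nat) : Int) by norm_num, vw_cast_land]
  by_cases hj0 : j = 0
  · subst hj0
    rw [if_pos (by omega), if_pos rfl]
    rw [show (128 : Int) = ((128 : Nat) : Int) by norm_num, vw_cast_lor]
    simp only [Int.toNat_natCast, Nat.sub_zero]
    rfl
  · rw [if_neg (by omega), if_neg hj0]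
    rw [show (0 : Int) = ((0 : Nat) : Int) by norm_num, vw_cast_lor]
    simp [Int.toNat_natCast, vwGroup]

-- ===== VERDICT (by name: the statement is the Claim_ definition above) =====
theorem variable_width_int_backwards_spec : Claim_equal_variable_width_int_backwards := by
  intro value _hdom hpre
  unfold Spec_variable_width_int_backwards
  have hpre' : 0 ≤ value := hpre
  obtain ⟨m, rfl⟩ : ∃ m : Nat, value = (m : Int) := ⟨value.toNat, by omega⟩
  by_cases hm : m = 0
  · subst hm
    decide
  · rw [vw_A_eq m (by omega), vw_B_eq m (by omega)]
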